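-- pv_equiv track=rewrite | github.com/pypi-data/pypi-mirror-288 | packages/AkitaCode/AkitaCode-2.0.11-py3-none-any.whl/AkitaCode/numerics.py | to_int_format
-- ===== SOURCE A (Python) =====
-- def to_int_format(n):
--     """
--     Aquesta funció converteix un enter en format de complement a dos (utilitzat en la codificació de números negatius)
--     a un enter negatiu.
--
--     :param n: Valor que es vol convertir a format de complement a dos.
--     :type n: int
--     :return: Valor resultant de la conversió o False si n no és un enter.
--     :rtype: int (or False)
--     """
--     if type(n) == int:
--         if n > 0:
--             nstr = "{0:b}".format(n)
--             newval = 0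
--             for i in list(range(len(nstr))):
--                 if i == 0:
--                     newval -= 2**((len(nstr)-1)-i)*int(nstr[i])
--                 else:
--                     newval += 2**((len(nstr)-1)-i)*int(nstr[i])
--             return newval
--         else:
--             return False
--     else:
--         return False
-- ===== SOURCE B (Python) =====
-- def to_int_format(n):
--     if type(n) == int and n > 0:
--         return n - (1 << n.bit_length())
--     return False
-- ===== Notes on version B (the rewrite author's own statement) =====
-- stated objective: simpler
-- what changed: Replaces the binary-string construction and per-digit weighted loop with the closed form n - (1 << n.bit_length()).
-- outside the precondition, e.g. on to_int_format(0): A returns False, B returns False; on to_int_format(-3): A returns False, B returns False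
import Mathlib
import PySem

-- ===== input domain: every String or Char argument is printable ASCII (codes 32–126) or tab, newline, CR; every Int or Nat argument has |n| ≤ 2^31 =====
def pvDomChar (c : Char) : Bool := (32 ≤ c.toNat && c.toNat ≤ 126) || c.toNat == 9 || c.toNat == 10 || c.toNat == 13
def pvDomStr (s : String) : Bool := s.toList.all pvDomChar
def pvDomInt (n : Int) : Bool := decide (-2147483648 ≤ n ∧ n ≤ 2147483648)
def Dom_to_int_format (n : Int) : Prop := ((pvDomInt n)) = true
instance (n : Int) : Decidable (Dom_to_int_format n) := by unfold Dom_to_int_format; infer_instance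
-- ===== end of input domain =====

-- B replaces A's binary-string digit loop by the closed form n - 2^(bit length of n); equivalence proved for n > 0.

-- ===== PORT A =====
-- "{0:b}".format(n): the binary digits of n, most significant first (empty for 0)
def binDigits : Nat → List Int
  | 0 => []
  | (m+1) => binDigits ((m+1)/2) ++ [(((m+1) % 2 : Nat) : Int)]
decreasing_by exact Nat.div_lt_self (Nat.succ_pos m) (by norm_num)

def to_int_format (n : Int) : Int :=
  if 0 < n then
    let nstr := binDigits n.toNat
    let L := nstr.length
    (List.range L).foldl
      (fun newval i =>
        if i = 0 then newval - 2 ^ (L - 1 - i) * nstr.getD i 0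
        else newval + 2 ^ (L - 1 - i) * nstr.getD i 0) 0
  else 0  -- Python returns False (not an int) here; excluded by Pre_

-- ===== PORT B =====
-- n.bit_length() for n ≥ 0 is Nat.size
def to_int_format_alt (n : Int) : Int :=
  if 0 < n then n - 2 ^ (Nat.size n.toNat) else 0  -- Python returns False here; excluded by Pre_

-- ===== PRECONDITION & SPEC =====
-- Pre_ excludes n ≤ 0, where A (and B) return the bool False, which is not a value of the declared int type.
def Pre_to_int_format (n : Int) : Prop := 0 < n
instance (n : Int) : Decidable (Pre_to_int_format n) := by unfold Pre_to_int_format; infer_instance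
def pvWitness_to_int_format : Int := (5)

def Spec_to_int_format (n : Int) (out : Int) : Prop := out = to_int_format_alt n
instance (n : Int) (out : Int) : Decidable (Spec_to_int_format n out) := by unfold Spec_to_int_format; infer_instance

-- ===== CLAIM (what is proved, stated in full; the proofs are below) =====
def Claim_equal_to_int_format : Prop := ∀ (n : Int), Dom_to_int_format n → Pre_to_int_format n → Spec_to_int_format n (to_int_format n)

-- ===== LEMMAS AND PROOFS =====

-- horner value of a digit list (MSB first)
def hornerVal (l : List Int) : Int := l.foldl (fun a d => 2 * a + d) 0

theorem hornerVal_append (l : List Int) (d : Int) :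
    hornerVal (l ++ [d]) = 2 * hornerVal l + d := by
  simp [hornerVal, List.foldl_append]

theorem hornerVal_binDigits (m : Nat) : hornerVal (binDigits m) = (m : Int) := by
  induction m using Nat.strong_induction_on with
  | _ m ih =>
    match m with
    | 0 => simp [binDigits, hornerVal]
    | (k+1) =>
      rw [binDigits, hornerVal_append, ih ((k+1)/2) (Nat.div_lt_self (Nat.succ_pos k) (by norm_num))]
      have := Nat.div_add_mod (k+1) 2
      push_cast
      omega

theorem binDigits_length_pos (m : Nat) (h : 0 < m) : 0 < (binDigits m).length := by
  match m, h with
  | (k+1), _ => rw [binDigits]; simp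

theorem binDigits_head (m : Nat) (h : 0 < m) : (binDigits m).getD 0 0 = 1 := by
  induction m using Nat.strong_induction_on with
  | _ m ih =>
    match m, h with
    | (k+1), _ =>
      rw [binDigits]
      by_cases h2 : (k+1)/2 = 0
      · have : k = 0 := by omega
        subst this
        simp [h2, binDigits]
      · have hp : 0 < (binDigits ((k+1)/2)).length :=
          binDigits_length_pos _ (Nat.pos_of_ne_zero h2)
        rw [List.getD_append _ _ _ _ hp]
        exact ih ((k+1)/2) (Nat.div_lt_self (Nat.succ_pos k) (by norm_num)) (Nat.pos_of_ne_zero h2)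

theorem size_rec (m : Nat) (h : 0 < m) : Nat.size m = Nat.size (m/2) + 1 := by
  apply le_antisymm
  · apply Nat.size_le.mpr
    have h1 := Nat.lt_size_self (m/2)
    have : (2:Nat) ^ (Nat.size (m/2) + 1) = 2 ^ Nat.size (m/2) * 2 := pow_succ 2 _
    omega
  · apply Nat.lt_size.mpr
    by_cases h2 : m / 2 = 0
    · simp [h2]; omega
    · have hk : 0 < Nat.size (m/2) := Nat.size_pos.mpr (Nat.pos_of_ne_zero h2)
      have h3 : 2 ^ (Nat.size (m/2) - 1) ≤ m / 2 := Nat.lt_size.mp (by omega)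
      have h4 : (2:Nat) ^ (Nat.size (m/2) - 1 + 1) = 2 ^ (Nat.size (m/2) - 1) * 2 := pow_succ 2 _
      have h5 : Nat.size (m/2) - 1 + 1 = Nat.size (m/2) := by omega
      rw [← h5, h4]
      omega

theorem binDigits_length (m : Nat) : (binDigits m).length = Nat.size m := by
  induction m using Nat.strong_induction_on with
  | _ m ih =>
    match m with
    | 0 => simp [binDigits, Nat.size_zero]
    | (k+1) =>
      rw [binDigits, size_rec (k+1) (Nat.succ_pos k)]
      simp [ih ((k+1)/2) (Nat.div_lt_self (Nat.succ_pos k) (by norm_num))]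

theorem foldl_range_add (L : Nat) (g : Nat → Int) (a : Int) :
    (List.range L).foldl (fun acc i => acc + g i) a = a + ∑ i ∈ Finset.range L, g i := by
  induction L generalizing a with
  | zero => simp
  | succ L ih => rw [List.range_succ, List.foldl_append, ih, Finset.sum_range_succ]; simp; ring

theorem sum_weights (l : List Int) :
    ∑ i ∈ Finset.range l.length, (2:Int) ^ (l.length - 1 - i) * l.getD i 0 = hornerVal l := by
  induction l using List.reverseRecOn with
  | nil => simp [hornerVal]
  | append_singleton l d ih =>
    rw [List.length_append, List.length_singleton, Finset.sum_range_succ, hornerVal_append, ← ih]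
    have h1 : (l ++ [d]).getD l.length 0 = d := by
      simp [List.getD]
    rw [h1]
    have h2 : ∀ i ∈ Finset.range l.length,
        (2:Int) ^ (l.length + 1 - 1 - i) * (l ++ [d]).getD i 0
          = 2 * ((2:Int) ^ (l.length - 1 - i) * l.getD i 0) := by
      intro i hi
      have hi' : i < l.length := Finset.mem_range.mp hi
      rw [List.getD_append _ _ _ _ hi']
      have : l.length + 1 - 1 - i = (l.length - 1 - i) + 1 := by omega
      rw [this, pow_succ]
      ring
    rw [Finset.sum_congr rfl h2, ← Finset.mul_sum]
    simp

-- ===== VERDICT (by name: the statement is the Claim_ definition above) =====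
theorem to_int_format_spec : Claim_equal_to_int_format := by
  intro n _ hpre
  have hn : 0 < n := hpre
  unfold Spec_to_int_format to_int_format to_int_format_alt
  rw [if_pos hn, if_pos hn]
  show (List.range (binDigits n.toNat).length).foldl
      (fun newval i =>
        if i = 0 then newval - 2 ^ ((binDigits n.toNat).length - 1 - i) * (binDigits n.toNat).getD i 0
        else newval + 2 ^ ((binDigits n.toNat).length - 1 - i) * (binDigits n.toNat).getD i 0) 0
    = n - 2 ^ (Nat.size n.toNat)
  set m := n.toNat with hm
  have hmpos : 0 < m := by omega
  set l := binDigits m with hl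
  have hLpos : 0 < l.length := binDigits_length_pos m hmpos
  have hbody : (fun (newval : Int) (i : Nat) =>
      if i = 0 then newval - 2 ^ (l.length - 1 - i) * l.getD i 0
      else newval + 2 ^ (l.length - 1 - i) * l.getD i 0)
    = (fun (acc : Int) (i : Nat) => acc +
        (if i = 0 then -(2 ^ (l.length - 1 - i) * l.getD i 0)
         else 2 ^ (l.length - 1 - i) * l.getD i 0)) := by
    funext a i; split_ifs <;> ring
  rw [hbody, foldl_range_add, zero_add]
  have hsplit : ∑ i ∈ Finset.range l.length,
      (if i = 0 then -((2:Int) ^ (l.length - 1 - i) * l.getD i 0)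
       else (2:Int) ^ (l.length - 1 - i) * l.getD i 0)
    = (∑ i ∈ Finset.range l.length, (2:Int) ^ (l.length - 1 - i) * l.getD i 0)
      - 2 * ((2:Int) ^ (l.length - 1 - 0) * l.getD 0 0) := by
    have hterm : ∀ i ∈ Finset.range l.length,
        (if i = 0 then -((2:Int) ^ (l.length - 1 - i) * l.getD i 0)
         else (2:Int) ^ (l.length - 1 - i) * l.getD i 0)
      = (2:Int) ^ (l.length - 1 - i) * l.getD i 0
          - (if i = 0 then 2 * ((2:Int) ^ (l.length - 1 - i) * l.getD i 0) else 0) := by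
      intro i _; split_ifs <;> ring
    rw [Finset.sum_congr rfl hterm, Finset.sum_sub_distrib,
      Finset.sum_ite_eq' (Finset.range l.length) 0
        (fun i => 2 * ((2:Int) ^ (l.length - 1 - i) * l.getD i 0)),
      if_pos (Finset.mem_range.mpr hLpos)]
  rw [hsplit, sum_weights, hornerVal_binDigits, binDigits_head m hmpos, ← binDigits_length]
  have hcast : (m : Int) = n := by omega
  have hLs : l.length - 1 + 1 = l.length := by omega
  have h2L : (2:Int) * (2 ^ (l.length - 1 - 0) * 1) = 2 ^ l.length := by
    rw [Nat.sub_zero]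
    conv_rhs => rw [← hLs]
    rw [pow_succ]; ring
  rw [hcast, h2L]
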